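-- pv_equiv track=rewrite | github.com/CocoRoF/Contextifier | contextifier_new/handlers/ppt/content_extractor.py | _group_into_slides
-- ===== SOURCE A (Python) =====
-- from typing import Any, Dict, List, Optional, Set, Tuple
--
-- def _group_into_slides(records: List[Tuple[int, str]]) -> List[List[str]]:
--     """
--     Group text records into slides.
--
--     This is a heuristic: in the PPT binary format, text records
--     for each slide are grouped together sequentially. We use
--     gaps between record offsets to detect slide boundaries.
--
--     If we can't detect boundaries, all text goes into one slide.
--     """
--     if not records:
--         return []
--
--     if len(records) <= 1:
--         return [[r[1] for r in records]]
--
--     # Calculate gaps between consecutive records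
--     gaps: List[int] = []
--     for i in range(1, len(records)):
--         gap = records[i][0] - records[i - 1][0]
--         gaps.append(gap)
--
--     if not gaps:
--         return [[r[1] for r in records]]
--
--     # Use a threshold gap to split slides
--     # Records within the same slide tend to be close together
--     median_gap = sorted(gaps)[len(gaps) // 2]
--     threshold = max(median_gap * 3, 1000)  # At least 1000 bytes gap
--
--     slides: List[List[str]] = []
--     current_slide: List[str] = [records[0][1]]
--
--     for i in range(1, len(records)):
--         gap = records[i][0] - records[i - 1][0]
--         if gap > threshold:
--             slides.append(current_slide)
--             current_slide = []
--         current_slide.append(records[i][1])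
--
--     if current_slide:
--         slides.append(current_slide)
--
--     return slides
-- ===== SOURCE B (Python) =====
-- def _nth_smallest(xs, k):
--     # iterative quickselect, first-element pivot
--     while True:
--         pivot = xs[0]
--         less = [x for x in xs if x < pivot]
--         if k < len(less):
--             xs = less
--             continue
--         equal = sum(1 for x in xs if x == pivot)
--         if k < len(less) + equal:
--             return pivot
--         k -= len(less) + equal
--         xs = [x for x in xs if x > pivot]
--
--
-- def _group_into_slides(records):
--     if not records:
--         return []
--     if len(records) == 1:
--         return [[records[0][1]]]
--     gaps = [b[0] - a[0] for a, b in zip(records, records[1:])]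
--     median_gap = _nth_smallest(gaps, len(gaps) // 2)
--     threshold = max(3 * median_gap, 1000)
--     slides = [[records[0][1]]]
--     for gap, (_, text) in zip(gaps, records[1:]):
--         if gap > threshold:
--             slides.append([text])
--         else:
--             slides[-1].append(text)
--     return slides
-- ===== Notes on version B (the rewrite author's own statement) =====
-- stated objective: alternative
-- what changed: B finds the median gap with an iterative first-element-pivot quickselect instead of fully sorting the gap list, computes the gaps with a single zip over adjacent pairs instead of index arithmetic, and builds the slides by appending to the last slide of the result list instead of keeping a separate current-slide accumulator with a final flush.
import Mathlib
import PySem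

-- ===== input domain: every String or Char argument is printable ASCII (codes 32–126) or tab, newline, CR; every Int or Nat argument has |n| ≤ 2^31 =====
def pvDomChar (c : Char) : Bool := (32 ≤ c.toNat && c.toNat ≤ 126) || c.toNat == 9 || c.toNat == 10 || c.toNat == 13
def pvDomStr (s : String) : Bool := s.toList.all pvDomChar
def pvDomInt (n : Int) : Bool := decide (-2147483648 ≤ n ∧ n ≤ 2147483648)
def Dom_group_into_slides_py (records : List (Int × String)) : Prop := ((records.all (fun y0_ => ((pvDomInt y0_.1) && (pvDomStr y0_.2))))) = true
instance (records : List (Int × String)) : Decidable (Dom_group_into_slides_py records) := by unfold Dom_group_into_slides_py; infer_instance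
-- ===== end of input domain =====

-- B replaces A's full sort of the gap list by a quickselect of the median gap and
-- builds the slide list in a single zip pass (appending to the last slide in place).

-- ===== PORT A =====
-- literal transliteration of _group_into_slides (Source A); all list indices the Python
-- takes are in range, so the pyGetD default (0, "") is never read
def group_into_slides_py (records : List (Int × String)) : List (List String) :=
  if records = [] then []
  else if records.length ≤ 1 then [records.map (fun r => r.2)]
  else
    let gaps : List Int :=
      (PySem.List.pyRange 1 (records.length : Int) 1).foldl
        (fun acc i =>
          acc ++ [(PySem.List.pyGetD records i (0, "")).1
                    - (PySem.List.pyGetD records (i - 1) (0, "")).1]) []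
    if gaps = [] then [records.map (fun r => r.2)]
    else
      -- sorted(gaps)[len(gaps) // 2]: the index is nonnegative and in range
      let median_gap : Int :=
        (PySem.List.sorted gaps (fun x => x) false).getD (gaps.length / 2) 0
      let threshold : Int := max (median_gap * 3) 1000
      let st :=
        (PySem.List.pyRange 1 (records.length : Int) 1).foldl
          (fun (st : List (List String) × List String) i =>
            let gap := (PySem.List.pyGetD records i (0, "")).1
                         - (PySem.List.pyGetD records (i - 1) (0, "")).1
            let st' := if gap > threshold then (st.1 ++ [st.2], ([] : List String)) else st
            (st'.1, st'.2 ++ [(PySem.List.pyGetD records i (0, "")).2]))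
          ([], [(PySem.List.pyGetD records 0 (0, "")).2])
      if st.2 ≠ [] then st.1 ++ [st.2] else st.1

-- ===== PORT B =====
-- slides[-1].append(t) on a nonempty list of slides (the [] case is never reached)
def appendLast (slides : List (List String)) (t : String) : List (List String) :=
  match slides with
  | [] => []
  | [l] => [l ++ [t]]
  | l :: l' :: ls => l :: appendLast (l' :: ls) t

-- iterative quickselect with first-element pivot (_nth_smallest in Source B);
-- callers always pass k < xs.length, so the [] case is never reached
def nthSmallest : List Int → Nat → Int
  | [], _ => 0
  | x :: t, k =>
    let less := (x :: t).filter (fun y => decide (y < x))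
    if k < less.length then nthSmallest less k
    else
      let equal := (x :: t).countP (fun y => y == x)
      if k < less.length + equal then x
      else nthSmallest ((x :: t).filter (fun y => decide (x < y))) (k - (less.length + equal))
  termination_by xs _ => xs.length
  decreasing_by
  · simp only [List.filter_cons, decide_eq_true_eq, lt_irrefl, if_false, List.length_cons]
    exact Nat.lt_succ_of_le (List.length_filter_le _ t)
  · simp only [List.filter_cons, decide_eq_true_eq, lt_irrefl, if_false, List.length_cons]
    exact Nat.lt_succ_of_le (List.length_filter_le _ t)

def group_into_slides_py_alt (records : List (Int × String)) : List (List String) :=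
  match records with
  | [] => []
  | [r] => [[r.2]]
  | r0 :: rest =>
    let gaps := ((r0 :: rest).zip rest).map (fun p => p.2.1 - p.1.1)
    let median_gap := nthSmallest gaps (gaps.length / 2)
    let threshold := max (3 * median_gap) 1000
    (gaps.zip rest).foldl
      (fun slides gt =>
        if gt.1 > threshold then slides ++ [[gt.2.2]]
        else appendLast slides gt.2.2)
      [[r0.2]]

-- ===== PRECONDITION & SPEC =====
def Spec_group_into_slides_py (records : List (Int × String)) (out : List (List String)) : Prop := out = group_into_slides_py_alt records
instance (records : List (Int × String)) (out : List (List String)) : Decidable (Spec_group_into_slides_py records out) := by unfold Spec_group_into_slides_py; infer_instance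

-- ===== CLAIM (what is proved, stated in full; the proofs are below) =====
def Claim_equal_group_into_slides_py : Prop := ∀ (records : List (Int × String)), Dom_group_into_slides_py records → Spec_group_into_slides_py records (group_into_slides_py records)

-- ===== LEMMAS AND PROOFS =====

lemma pyRange_one_eq (m : Nat) :
    PySem.List.pyRange 1 ((m + 1 : Nat) : Int) 1 = (List.range m).map (fun j : Nat => (j : Int) + 1) := by
  induction m with
  | zero => decide
  | succ m ih =>
      have h1 : ((m + 1 + 1 : Nat) : Int) = ((m + 1 : Nat) : Int) + 1 := by push_cast; ring
      rw [h1, PySem.List.pyRange_one_succ_right (by omega), ih, List.range_succ]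
      simp

lemma foldl_range_getD {α β : Type} (l : List α) (d : α) (F : β → α → β) (init : β) :
    (List.range l.length).foldl (fun st j => F st (l.getD j d)) init = l.foldl F init := by
  induction l using List.reverseRecOn generalizing init with
  | nil => rfl
  | append_singleton l x ih =>
      have hlen : (l ++ [x]).length = l.length + 1 := by simp
      rw [hlen, List.range_succ, List.foldl_append, List.foldl_append]
      rw [PySem.List.foldl_congr_mem _ _ (fun st j => F st (l.getD j d)) init
            (by intro acc j hj
                rw [List.getD_append _ _ _ _ (List.mem_range.mp hj)]), ih]
      simp only [List.foldl_cons, List.foldl_nil]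
      rw [List.getD_append_right l [x] d l.length (le_refl _)]
      simp

lemma appendLast_concat (s : List (List String)) (c : List String) (t : String) :
    appendLast (s ++ [c]) t = s ++ [c ++ [t]] := by
  induction s with
  | nil => rfl
  | cons a s ih =>
      cases s with
      | nil => rfl
      | cons b s' => simpa [appendLast] using ih

lemma sim (thr : Int) (P : List ((Int × String) × (Int × String))) :
    ∀ (slides : List (List String)) (cur : List String), cur ≠ [] →
    (if (P.foldl (fun st p =>
        let st' := if p.2.1 - p.1.1 > thr then (st.1 ++ [st.2], ([] : List String)) else st
        (st'.1, st'.2 ++ [p.2.2])) (slides, cur)).2 ≠ [] then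
       (P.foldl (fun st p =>
        let st' := if p.2.1 - p.1.1 > thr then (st.1 ++ [st.2], ([] : List String)) else st
        (st'.1, st'.2 ++ [p.2.2])) (slides, cur)).1
         ++ [(P.foldl (fun st p =>
        let st' := if p.2.1 - p.1.1 > thr then (st.1 ++ [st.2], ([] : List String)) else st
        (st'.1, st'.2 ++ [p.2.2])) (slides, cur)).2]
     else
       (P.foldl (fun st p =>
        let st' := if p.2.1 - p.1.1 > thr then (st.1 ++ [st.2], ([] : List String)) else st
        (st'.1, st'.2 ++ [p.2.2])) (slides, cur)).1)
    = P.foldl (fun slides p =>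
        if p.2.1 - p.1.1 > thr then slides ++ [[p.2.2]] else appendLast slides p.2.2)
        (slides ++ [cur]) := by
  induction P with
  | nil => intro slides cur hc; simp [hc]
  | cons p P ih =>
      intro slides cur hc
      simp only [List.foldl_cons]
      by_cases h : p.2.1 - p.1.1 > thr
      · simpa [h] using ih (slides ++ [cur]) [p.2.2] (by simp)
      · simpa [h, appendLast_concat] using ih slides (cur ++ [p.2.2]) (by simp)

lemma sorted_decomp (x : Int) (t : List Int) :
    PySem.List.sorted (x :: t) (fun y => y) false
      = PySem.List.sorted ((x :: t).filter (fun y => decide (y < x))) (fun y => y) false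
        ++ List.replicate ((x :: t).countP (fun y => y == x)) x
        ++ PySem.List.sorted ((x :: t).filter (fun y => decide (x < y))) (fun y => y) false := by
  set xs := x :: t with hxs
  set L := xs.filter (fun y => decide (y < x)) with hL
  set E := xs.filter (fun y => y == x) with hE
  set G := xs.filter (fun y => decide (x < y)) with hG
  have hrep : List.replicate (xs.countP (fun y => y == x)) x = E := by
    rw [List.countP_eq_length_filter]
    exact (List.eq_replicate_of_mem (fun b hb => by
      have := List.of_mem_filter hb; exact eq_of_beq this)).symm
  have hEF : (xs.filter (fun y => !decide (y < x))).filter (fun y => y == x) = E := by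
    rw [List.filter_filter, hE]
    exact List.filter_congr (fun y _ => by
      by_cases hyx : y = x
      · simp [hyx]
      · simp [hyx])
  have hGF : (xs.filter (fun y => !decide (y < x))).filter (fun y => !(y == x)) = G := by
    rw [List.filter_filter, hG]
    exact List.filter_congr (fun y _ => by
      by_cases h1 : y < x
      · simp [h1, not_lt_of_gt h1]
      · by_cases h2 : y = x
        · simp [h2]
        · have : x < y := lt_of_le_of_ne (not_lt.mp h1) (Ne.symm h2)
          simp [h1, h2, this])
  have hperm : (L ++ (E ++ G)).Perm xs := by
    have h2 : (E ++ G).Perm (xs.filter (fun y => !decide (y < x))) := by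
      rw [← hEF, ← hGF]
      exact List.filter_append_perm _ _
    exact ((h2.append_left L).trans (List.filter_append_perm _ xs))
  apply PySem.List.eq_of_perm_of_pairwise_le_of_injective (fun y => y) (fun a b h => h)
  · -- permutation
    have h1 : ((PySem.List.sorted L (fun y => y) false)
        ++ (List.replicate (xs.countP (fun y => y == x)) x
            ++ PySem.List.sorted G (fun y => y) false)).Perm (L ++ (E ++ G)) := by
      refine List.Perm.append (PySem.List.sorted_perm L _ _) (List.Perm.append ?_ (PySem.List.sorted_perm G _ _))
      rw [hrep]
    rw [← List.append_assoc] at h1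
    exact (PySem.List.sorted_perm xs _ _).trans ((h1.trans hperm).symm)
  · exact PySem.List.sorted_pairwise xs _
  · -- pairwise ≤ of the concatenation
    have hmemL : ∀ a, a ∈ PySem.List.sorted L (fun y => y) false → a < x := by
      intro a ha
      have : a ∈ L := (PySem.List.sorted_perm L _ _).mem_iff.mp ha
      simpa using List.of_mem_filter this
    have hmemG : ∀ a, a ∈ PySem.List.sorted G (fun y => y) false → x < a := by
      intro a ha
      have : a ∈ G := (PySem.List.sorted_perm G _ _).mem_iff.mp ha
      simpa using List.of_mem_filter this
    rw [List.pairwise_append, List.pairwise_append]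
    refine ⟨⟨PySem.List.sorted_pairwise L (fun y => y), ?_, ?_⟩,
      PySem.List.sorted_pairwise G (fun y => y), ?_⟩
    · exact List.pairwise_replicate.mpr (Or.inr (le_refl x))
    · intro a ha b hb
      exact le_of_lt (lt_of_lt_of_le (hmemL a ha) (le_of_eq (List.eq_of_mem_replicate hb).symm))
    · intro a ha b hb
      rcases List.mem_append.mp ha with ha' | ha'
      · exact le_of_lt (lt_trans (hmemL a ha') (hmemG b hb))
      · exact le_of_lt ((List.eq_of_mem_replicate ha') ▸ hmemG b hb)

lemma nth_eq (xs : List Int) (k : Nat) :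
    k < xs.length → nthSmallest xs k = (PySem.List.sorted xs (fun y => y) false).getD k 0 := by
  fun_induction nthSmallest xs k with
  | case1 k => intro h; simp at h
  | case2 x t k less hlt ih =>
      intro h
      have hlt' : k < (List.filter (fun y => decide (y < x)) (x :: t)).length := hlt
      have h2 : k < (PySem.List.sorted ((x :: t).filter (fun y => decide (y < x))) (fun y => y) false).length := by
        rw [PySem.List.length_sorted]; exact hlt'
      have h1 : k < (PySem.List.sorted ((x :: t).filter (fun y => decide (y < x))) (fun y => y) false
          ++ List.replicate ((x :: t).countP (fun y => y == x)) x).length := by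
        rw [List.length_append]; omega
      rw [sorted_decomp x t, List.getD_append _ _ _ _ h1, List.getD_append _ _ _ _ h2]
      exact ih hlt
  | case3 x t k less hge equal hlt =>
      intro h
      have hge' : (List.filter (fun y => decide (y < x)) (x :: t)).length ≤ k := Nat.le_of_not_lt hge
      have hlt' : k < (List.filter (fun y => decide (y < x)) (x :: t)).length
          + (x :: t).countP (fun y => y == x) := hlt
      have hmid : k < (PySem.List.sorted ((x :: t).filter (fun y => decide (y < x))) (fun y => y) false
          ++ List.replicate ((x :: t).countP (fun y => y == x)) x).length := by
        rw [List.length_append, PySem.List.length_sorted, List.length_replicate]; omega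
      have hright : (PySem.List.sorted ((x :: t).filter (fun y => decide (y < x))) (fun y => y) false).length ≤ k := by
        rw [PySem.List.length_sorted]; exact hge'
      rw [sorted_decomp x t, List.getD_append _ _ _ _ hmid,
        List.getD_append_right _ _ _ _ hright, PySem.List.length_sorted]
      have hk : k - (List.filter (fun y => decide (y < x)) (x :: t)).length
          < (x :: t).countP (fun y => y == x) := by omega
      rw [List.getD_eq_getElem _ _ (by simpa using hk)]
      exact (List.getElem_replicate _).symm
  | case4 x t k less hge equal hge2 ih =>
      intro h
      have hge' : (List.filter (fun y => decide (y < x)) (x :: t)).length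
          + (x :: t).countP (fun y => y == x) ≤ k := Nat.le_of_not_lt hge2
      have hlen : (x :: t).length = (List.filter (fun y => decide (y < x)) (x :: t)).length
          + (x :: t).countP (fun y => y == x)
          + ((x :: t).filter (fun y => decide (x < y))).length := by
        have h' := congrArg List.length (sorted_decomp x t)
        simp only [List.length_append, PySem.List.length_sorted, List.length_replicate] at h'
        omega
      have hmid : (PySem.List.sorted ((x :: t).filter (fun y => decide (y < x))) (fun y => y) false
          ++ List.replicate ((x :: t).countP (fun y => y == x)) x).length ≤ k := by
        rw [List.length_append, PySem.List.length_sorted, List.length_replicate]; omega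
      rw [sorted_decomp x t, List.getD_append_right _ _ _ _ hmid,
        List.length_append, PySem.List.length_sorted, List.length_replicate]
      exact ih (show k - ((List.filter (fun y => decide (y < x)) (x :: t)).length
          + (x :: t).countP (fun y => y == x))
          < ((x :: t).filter (fun y => decide (x < y))).length by omega)

lemma gaps_eq (r0 : Int × String) (rest : List (Int × String)) :
    (PySem.List.pyRange 1 (((r0 :: rest).length : Nat) : Int) 1).map (fun i =>
      (PySem.List.pyGetD (r0 :: rest) i ((0 : Int), "")).1
        - (PySem.List.pyGetD (r0 :: rest) (i - 1) ((0 : Int), "")).1)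
    = ((r0 :: rest).zip rest).map (fun p => p.2.1 - p.1.1) := by
  rw [List.length_cons, pyRange_one_eq rest.length, List.map_map]
  apply List.ext_getElem
  · simp
  · intro j h1 h2
    have hj : j < rest.length := by simpa using h1
    simp only [List.getElem_map, List.getElem_range, Function.comp, List.getElem_zip]
    have e2 : ((j : Int) + 1) - 1 = ((j : Nat) : Int) := by push_cast; ring
    have e1 : ((j : Int) + 1) = ((j + 1 : Nat) : Int) := by push_cast; ring
    rw [e2, e1, PySem.List.pyGetD_natCast, PySem.List.pyGetD_natCast,
      List.getD_eq_getElem _ _ (by simpa using Nat.succ_lt_succ hj),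
      List.getD_eq_getElem _ _ (by simp; omega),
      List.getElem_cons_succ]

lemma loop_eq (r0 : Int × String) (rest : List (Int × String)) (thr : Int)
    (init : List (List String) × List String) :
    (PySem.List.pyRange 1 (((r0 :: rest).length : Nat) : Int) 1).foldl
      (fun (st : List (List String) × List String) i =>
        let gap := (PySem.List.pyGetD (r0 :: rest) i ((0 : Int), "")).1
                     - (PySem.List.pyGetD (r0 :: rest) (i - 1) ((0 : Int), "")).1
        let st' := if gap > thr then (st.1 ++ [st.2], ([] : List String)) else st
        (st'.1, st'.2 ++ [(PySem.List.pyGetD (r0 :: rest) i ((0 : Int), "")).2])) init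
    = ((r0 :: rest).zip rest).foldl
      (fun st p =>
        let st' := if p.2.1 - p.1.1 > thr then (st.1 ++ [st.2], ([] : List String)) else st
        (st'.1, st'.2 ++ [p.2.2])) init := by
  rw [List.length_cons, pyRange_one_eq rest.length, List.foldl_map]
  have hP : ((r0 :: rest).zip rest).length = rest.length := by simp
  calc (List.range rest.length).foldl _ init
      = (List.range rest.length).foldl (fun st j =>
          (fun (st : List (List String) × List String)
               (p : (Int × String) × (Int × String)) =>
            let st' := if p.2.1 - p.1.1 > thr then (st.1 ++ [st.2], ([] : List String)) else st
            (st'.1, st'.2 ++ [p.2.2])) st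
            (((r0 :: rest).zip rest).getD j (((0 : Int), ""), ((0 : Int), "")))) init := by
        apply PySem.List.foldl_congr_mem
        intro acc j hj
        have hjm : j < rest.length := List.mem_range.mp hj
        have e2 : ((j : Int) + 1) - 1 = ((j : Nat) : Int) := by ring
        have e1 : ((j : Int) + 1) = ((j + 1 : Nat) : Int) := by push_cast; ring
        rw [e2, e1, PySem.List.pyGetD_natCast, PySem.List.pyGetD_natCast,
          List.getD_eq_getElem _ _ (by simpa using Nat.succ_lt_succ hjm),
          List.getD_eq_getElem _ _ (by simp; omega),
          List.getD_eq_getElem _ _ (by simpa using hjm),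
          List.getElem_zip, List.getElem_cons_succ]
    _ = ((r0 :: rest).zip rest).foldl _ init := by
        rw [← hP]
        exact foldl_range_getD ((r0 :: rest).zip rest) (((0 : Int), ""), ((0 : Int), ""))
          (fun st p =>
            let st' := if p.2.1 - p.1.1 > thr then (st.1 ++ [st.2], ([] : List String)) else st
            (st'.1, st'.2 ++ [p.2.2])) init

-- ===== VERDICT (by name: the statement is the Claim_ definition above) =====
theorem group_into_slides_py_spec : Claim_equal_group_into_slides_py := by
  intro records _
  unfold Spec_group_into_slides_py
  match records with
  | [] => rfl
  | [r] => rfl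
  | r0 :: r1 :: rs =>
    simp only [group_into_slides_py, group_into_slides_py_alt]
    rw [if_neg (show ¬((r0 :: r1 :: rs) = []) by simp),
        if_neg (show ¬((r0 :: r1 :: rs).length ≤ 1) by simp)]
    rw [PySem.List.foldl_append_singleton_eq_map, List.nil_append, gaps_eq r0 (r1 :: rs)]
    rw [if_neg (show ¬(((r0 :: r1 :: rs).zip (r1 :: rs)).map (fun p => p.2.1 - p.1.1) = []) by simp)]
    set P := (r0 :: r1 :: rs).zip (r1 :: rs) with hP
    set G := P.map (fun p => p.2.1 - p.1.1) with hG
    have hGlen : G.length / 2 < G.length := Nat.div_lt_self (by simp [hG, hP]) one_lt_two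
    rw [← nth_eq G (G.length / 2) hGlen]
    rw [mul_comm (nthSmallest G (G.length / 2)) 3]
    set thr := max (3 * nthSmallest G (G.length / 2)) 1000 with hthr
    rw [show (PySem.List.pyGetD (r0 :: r1 :: rs) 0 ((0 : Int), "")) = r0 by simp [PySem.List.pyGetD]]
    rw [loop_eq r0 (r1 :: rs) thr]
    have hrest : List.map Prod.snd P = (r1 :: rs) := List.map_snd_zip (by simp)
    have hzip : G.zip (r1 :: rs) = P.map (fun p => (p.2.1 - p.1.1, p.2)) := by
      rw [hG, ← hrest]
      exact List.zip_map'
    rw [hzip, List.foldl_map]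
    simpa using sim thr P [] [r0.2] (by simp)
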